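-- pv_equiv track=rewrite | github.com/jayantiii/LeetCode_blah | heap/1052-campus-bikes/campus-bikes.py | assignBikes
-- ===== SOURCE A (Python) =====
-- from typing import List
--
-- def assignBikes(workers: List[List[int]], bikes: List[List[int]]) -> List[int]:
--     n = len(workers)
--     m = len(bikes)
--     pairs = [] #[(dist,wi,bj)...]
--     for i in range(n):
--         for j in range(m):
--             p1x= workers[i][0]
--             p2x = bikes[j][0]
--
--             p1y= workers[i][1]
--             p2y = bikes[j][1]
--
--             dist = abs(p1x-p2x) + abs(p1y-p2y)
--
--             pairs.append((dist,i,j))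
--
--     pairs.sort() #IMP - sort by distance!!
--
--     res = [0]*n
--     barr = [False]*m #if used
--     warr = [False]*n #don’t need warr if you use res[w] != -1
--     count = 0
--     for i in range(len(pairs)):
--         d,w,b = pairs[i]
--         if barr[b] or warr[w]: #used up either
--             continue
--
--         res[w] = b
--         barr[b] = True
--         warr[w] = True
--
--         count +=1
--         if count == n:
--             break
--
--     return res
-- ===== SOURCE B (Python) =====
-- from typing import List
--
-- def assignBikes(workers: List[List[int]], bikes: List[List[int]]) -> List[int]:
--     n = len(workers)
--     m = len(bikes)
--     res = [0] * n
--     wused = [False] * n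
--     bused = [False] * m
--     for _ in range(n):
--         best = None
--         for i in range(n):
--             if wused[i]:
--                 continue
--             for j in range(m):
--                 if bused[j]:
--                     continue
--                 d = abs(workers[i][0] - bikes[j][0]) + abs(workers[i][1] - bikes[j][1])
--                 if best is None or (d, i, j) < best:
--                     best = (d, i, j)
--         if best is None:
--             break
--         d, i, j = best
--         res[i] = j
--         wused[i] = True
--         bused[j] = True
--     return res
-- ===== Notes on version B (the rewrite author's own statement) =====
-- stated objective: alternative
-- what changed: B never builds or sorts the n*m pair list: it runs a selection loop - up to n rounds, each round scanning the still-free workers and bikes for the globally closest (dist,i,j) pair and assigning it - i.e. repeated minimum selection instead of A's sort-then-greedy-scan.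
import Mathlib
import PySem

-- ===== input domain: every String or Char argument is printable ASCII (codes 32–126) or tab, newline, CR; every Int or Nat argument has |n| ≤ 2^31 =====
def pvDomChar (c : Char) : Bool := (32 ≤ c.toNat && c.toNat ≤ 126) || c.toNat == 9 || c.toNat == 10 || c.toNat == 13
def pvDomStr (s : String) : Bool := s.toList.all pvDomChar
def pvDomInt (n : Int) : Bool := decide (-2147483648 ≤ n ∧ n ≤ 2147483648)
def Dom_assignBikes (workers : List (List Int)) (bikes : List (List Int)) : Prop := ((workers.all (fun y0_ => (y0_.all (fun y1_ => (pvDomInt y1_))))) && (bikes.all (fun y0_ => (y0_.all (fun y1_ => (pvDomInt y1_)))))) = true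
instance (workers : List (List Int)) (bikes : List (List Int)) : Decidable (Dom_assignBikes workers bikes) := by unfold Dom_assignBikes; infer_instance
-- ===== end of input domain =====

-- B replaces A's build-all-pairs-and-sort greedy by repeated minimum SELECTION: up to n
-- rounds, each scanning the still-free workers/bikes for the closest (dist, i, j) pair
-- (objective: alternative — no pair list and no sort are ever materialised).

-- ===== PORT A =====
-- xs[i][c]; exact when both indices are in range (the loop ranges and Pre_ guarantee that)
def pvAt (xs : List (List Int)) (i c : Int) : Int :=
  (PySem.List.pyGet? ((PySem.List.pyGet? xs i).getD []) c).getD 0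

-- Python's tuple comparison on (dist, i, j): lexicographic
def pvKey (t : Int × Int × Int) : Int ×ₗ (Int ×ₗ Int) := toLex (t.1, toLex (t.2.1, t.2.2))

-- the 'for i in range(len(pairs))' loop with continue / break
def pvLoopA : List (Int × Int × Int) → Int → List Int → List Bool → List Bool → Int → List Int
  | [], _, res, _, _, _ => res
  | (_, w, b) :: rest, n, res, barr, warr, count =>
    if PySem.List.pyGetD barr b false || PySem.List.pyGetD warr w false then
      pvLoopA rest n res barr warr count
    else
      let res' := PySem.List.pySetD res w b
      let barr' := PySem.List.pySetD barr b true
      let warr' := PySem.List.pySetD warr w true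
      if count + 1 == n then res' else pvLoopA rest n res' barr' warr' (count + 1)

def assignBikes (workers : List (List Int)) (bikes : List (List Int)) : List Int :=
  let n : Int := workers.length
  let m : Int := bikes.length
  let pairs : List (Int × Int × Int) :=
    (PySem.List.pyRange 0 n 1).foldl (fun acc i =>
      (PySem.List.pyRange 0 m 1).foldl (fun acc2 j =>
        let p1x := pvAt workers i 0
        let p2x := pvAt bikes j 0
        let p1y := pvAt workers i 1
        let p2y := pvAt bikes j 1
        let dist := |p1x - p2x| + |p1y - p2y|
        acc2 ++ [(dist, i, j)]) acc) []
  let sortedPairs := PySem.List.sorted pairs pvKey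
  pvLoopA sortedPairs n (List.replicate workers.length (0 : Int))
    (List.replicate bikes.length false) (List.replicate workers.length false) 0

-- ===== PORT B =====
-- 'if best is None or (d, i, j) < best: best = (d, i, j)'  (Python tuple '<' is lexicographic)
def pvBestStep (best : Option (Int × Int × Int)) (t : Int × Int × Int) :
    Option (Int × Int × Int) :=
  match best with
  | none => some t
  | some b => if pvKey t < pvKey b then some t else best

-- one round's scan: nested loops over i, j with the 'continue's on used workers / bikes
def pvScan (workers bikes : List (List Int)) (wused bused : List Bool) :
    Option (Int × Int × Int) :=
  (PySem.List.pyRange 0 (workers.length : Int) 1).foldl (fun best i =>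
    if PySem.List.pyGetD wused i false then best
    else
      (PySem.List.pyRange 0 (bikes.length : Int) 1).foldl (fun best j =>
        if PySem.List.pyGetD bused j false then best
        else
          pvBestStep best
            (|pvAt workers i 0 - pvAt bikes j 0| + |pvAt workers i 1 - pvAt bikes j 1|, i, j))
        best) none

-- 'for _ in range(n)' with the break on best is None; state = (res, wused, bused)
def pvRounds (workers bikes : List (List Int)) :
    Nat → List Int × List Bool × List Bool → List Int × List Bool × List Bool
  | 0, st => st
  | f + 1, st =>
    match pvScan workers bikes st.2.1 st.2.2 with
    | none => st
    | some t =>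
      pvRounds workers bikes f
        (PySem.List.pySetD st.1 t.2.1 t.2.2, PySem.List.pySetD st.2.1 t.2.1 true,
         PySem.List.pySetD st.2.2 t.2.2 true)

def assignBikes_alt (workers : List (List Int)) (bikes : List (List Int)) : List Int :=
  (pvRounds workers bikes workers.length
    (List.replicate workers.length (0 : Int), List.replicate workers.length false,
     List.replicate bikes.length false)).1

-- ===== PRECONDITION & SPEC =====
-- Pre_ excludes exactly the inputs on which the Python A raises IndexError: a coordinate
-- row shorter than 2 read by the pairing loops (which read rows only when both lists are
-- nonempty).
def Pre_assignBikes (workers : List (List Int)) (bikes : List (List Int)) : Prop :=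
  workers = [] ∨ bikes = [] ∨
    ((∀ p ∈ workers, 2 ≤ p.length) ∧ (∀ p ∈ bikes, 2 ≤ p.length))
instance (workers : List (List Int)) (bikes : List (List Int)) : Decidable (Pre_assignBikes workers bikes) := by unfold Pre_assignBikes; infer_instance

def pvWitness_assignBikes : List (List Int) × List (List Int) :=
  ([[0, 0], [2, 1]], [[1, 2], [3, 3]])

def Spec_assignBikes (workers : List (List Int)) (bikes : List (List Int)) (out : List Int) : Prop := out = assignBikes_alt workers bikes
instance (workers : List (List Int)) (bikes : List (List Int)) (out : List Int) : Decidable (Spec_assignBikes workers bikes out) := by unfold Spec_assignBikes; infer_instance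

-- ===== CLAIM (what is proved, stated in full; the proofs are below) =====
def Claim_equal_assignBikes : Prop := ∀ (workers : List (List Int)) (bikes : List (List Int)), Dom_assignBikes workers bikes → Pre_assignBikes workers bikes → Spec_assignBikes workers bikes (assignBikes workers bikes)


-- ===== LEMMAS AND PROOFS =====

-- the pair list both programs enumerate, in generation order
def pvL (workers : List (List Int)) (bikes : List (List Int)) : List (Int × Int × Int) :=
  (PySem.List.pyRange 0 (workers.length : Int) 1).flatMap (fun i =>
    (PySem.List.pyRange 0 (bikes.length : Int) 1).map (fun j =>
      (|pvAt workers i 0 - pvAt bikes j 0| + |pvAt workers i 1 - pvAt bikes j 1|, i, j)))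

-- abstract state: (res, wused, bused)
def pvValid (st : List Int × List Bool × List Bool) (t : Int × Int × Int) : Bool :=
  !(PySem.List.pyGetD st.2.1 t.2.1 false) && !(PySem.List.pyGetD st.2.2 t.2.2 false)

def pvAssign (st : List Int × List Bool × List Bool) (t : Int × Int × Int) :
    List Int × List Bool × List Bool :=
  (PySem.List.pySetD st.1 t.2.1 t.2.2, PySem.List.pySetD st.2.1 t.2.1 true,
   PySem.List.pySetD st.2.2 t.2.2 true)

def pvStepB (st : List Int × List Bool × List Bool) (t : Int × Int × Int) :
    List Int × List Bool × List Bool :=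
  if pvValid st t then pvAssign st t else st

-- the common abstraction: fuelled repeated selection of the first valid element of L
def pvSel (L : List (Int × Int × Int)) : Nat → (List Int × List Bool × List Bool) → List Int × List Bool × List Bool
  | 0, st => st
  | f + 1, st =>
    match L.find? (pvValid st) with
    | none => st
    | some t => pvSel L f (pvAssign st t)

-- both indices of a pair are in-range natural numbers for the state
def pvRng (st : List Int × List Bool × List Bool) (t : Int × Int × Int) : Prop :=
  (∃ k : Nat, t.2.1 = (k : Int) ∧ k < st.2.1.length) ∧
  (∃ k : Nat, t.2.2 = (k : Int) ∧ k < st.2.2.length)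

theorem pvSetD_nat {α : Type} (xs : List α) (k : Nat) (v : α) (h : k < xs.length) :
    PySem.List.pySetD xs (k : Int) v = xs.set k v := by
  simp [PySem.List.pySetD, PySem.List.pySet?_natCast xs k v h]

theorem pvCount_set_true (l : List Bool) (k : Nat) (h : k < l.length) (hf : l[k] = false) :
    (l.set k true).count true = l.count true + 1 := by
  induction l generalizing k with
  | nil => simp at h
  | cons x t ih =>
    cases k with
    | zero => simp at hf; simp [hf]
    | succ k =>
      simp only [List.length_cons, Nat.succ_lt_succ_iff] at h
      simp only [List.getElem_cons_succ] at hf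
      simp [List.count_cons, ih k h hf]
      omega

theorem pvRng_assign (st : List Int × List Bool × List Bool) (u t : Int × Int × Int)
    (hu : pvRng st u) (ht : pvRng st t) : pvRng (pvAssign st u) t := by
  obtain ⟨⟨kw, hkw, hkwl⟩, ⟨kb, hkb, hkbl⟩⟩ := hu
  obtain ⟨⟨tw, htw, htwl⟩, ⟨tb, htb, htbl⟩⟩ := ht
  refine ⟨⟨tw, htw, ?_⟩, ⟨tb, htb, ?_⟩⟩
  · show tw < (PySem.List.pySetD st.2.1 u.2.1 true).length
    rw [hkw, pvSetD_nat _ _ _ hkwl, List.length_set]; exact htwl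
  · show tb < (PySem.List.pySetD st.2.2 u.2.2 true).length
    rw [hkb, pvSetD_nat _ _ _ hkbl, List.length_set]; exact htbl

theorem pvValid_assign_self (st : List Int × List Bool × List Bool) (t : Int × Int × Int)
    (ht : pvRng st t) : pvValid (pvAssign st t) t = false := by
  obtain ⟨⟨tw, htw, htwl⟩, ⟨tb, htb, htbl⟩⟩ := ht
  have h1 : PySem.List.pyGetD (pvAssign st t).2.1 t.2.1 false = true := by
    show PySem.List.pyGetD (PySem.List.pySetD st.2.1 t.2.1 true) t.2.1 false = true
    rw [htw, pvSetD_nat _ _ _ htwl, PySem.List.pyGetD_natCast,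
      List.getD_eq_getElem _ _ (by simpa using htwl), List.getElem_set_self]
  simp [pvValid, h1]

theorem pvMono (st : List Int × List Bool × List Bool) (u t : Int × Int × Int)
    (hu : pvRng st u) (ht : pvRng st t) (hv : pvValid st t = false) :
    pvValid (pvAssign st u) t = false := by
  obtain ⟨⟨kw, hkw, hkwl⟩, ⟨kb, hkb, hkbl⟩⟩ := hu
  obtain ⟨⟨tw, htw, htwl⟩, ⟨tb, htb, htbl⟩⟩ := ht
  have key : ∀ (l : List Bool) (k q : Nat), k < l.length → q < l.length →
      PySem.List.pyGetD l (q : Int) false = true →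
      PySem.List.pyGetD (l.set k true) (q : Int) false = true := by
    intro l k q hk hq h
    rw [PySem.List.pyGetD_natCast, List.getD_eq_getElem _ _ hq] at h
    rw [PySem.List.pyGetD_natCast, List.getD_eq_getElem _ _ (by simpa using hq)]
    by_cases hkq : k = q
    · subst hkq; exact List.getElem_set_self _
    · rw [List.getElem_set_ne hkq]; exact h
  simp only [pvValid, pvAssign] at hv ⊢
  rw [hkw, hkb, pvSetD_nat _ _ _ hkwl, pvSetD_nat _ _ _ hkbl]
  rcases hw : PySem.List.pyGetD st.2.1 t.2.1 false with _ | _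
  · rcases hb : PySem.List.pyGetD st.2.2 t.2.2 false with _ | _
    · rw [hw, hb] at hv; simp at hv
    · rw [htb] at hb
      have := key st.2.2 kb tb hkbl htbl hb
      rw [htb, this]; simp
  · rw [htw] at hw
    have := key st.2.1 kw tw hkwl htwl hw
    rw [htw, this]; simp

theorem pvSel_nil (f : Nat) (st : List Int × List Bool × List Bool) :
    pvSel [] f st = st := by
  cases f <;> rfl

theorem pvSel_skip (f : Nat) (L : List (Int × Int × Int)) (t : Int × Int × Int)
    (st : List Int × List Bool × List Bool) (hv : pvValid st t = false)
    (hL : ∀ u ∈ L, pvRng st u) (ht : pvRng st t) :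
    pvSel (t :: L) f st = pvSel L f st := by
  induction f generalizing st with
  | zero => rfl
  | succ f ih =>
    show pvSel (t :: L) (f + 1) st = pvSel L (f + 1) st
    unfold pvSel
    rw [List.find?_cons_of_neg (by simp [hv])]
    cases hfind : L.find? (pvValid st) with
    | none => rfl
    | some u =>
      have hu : u ∈ L := List.mem_of_find?_eq_some hfind
      exact ih (pvAssign st u)
        (pvMono st u t (hL u hu) ht hv)
        (fun v hv' => pvRng_assign st u v (hL u hu) (hL v hv'))
        (pvRng_assign st u t (hL u hu) ht)

theorem pvFold_eq_sel (L : List (Int × Int × Int)) (st : List Int × List Bool × List Bool)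
    (f : Nat) (hL : ∀ t ∈ L, pvRng st t)
    (hf : st.2.1.length ≤ st.2.1.count true + f) :
    L.foldl pvStepB st = pvSel L f st := by
  induction L generalizing st f with
  | nil => rw [pvSel_nil]; rfl
  | cons t L' ih =>
    have ht := hL t (by simp)
    have hL' : ∀ u ∈ L', pvRng st u := fun u hu => hL u (by simp [hu])
    by_cases hv : pvValid st t = true
    · -- t gets assigned
      obtain ⟨⟨tw, htw, htwl⟩, -⟩ := id ht
      have hwfalse : st.2.1[tw] = false := by
        have := (Bool.and_eq_true _ _).mp hv |>.1
        rw [htw, PySem.List.pyGetD_natCast, List.getD_eq_getElem _ _ htwl] at this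
        simpa using this
      have hcnt : st.2.1.count true < st.2.1.length := by
        have h1 := pvCount_set_true st.2.1 tw htwl hwfalse
        have h2 := List.count_le_length (l := st.2.1.set tw true) (a := true)
        rw [h1, List.length_set] at h2
        omega
      cases f with
      | zero => omega
      | succ f' =>
        have hstep : pvStepB st t = pvAssign st t := by simp [pvStepB, hv]
        have hsel : pvSel (t :: L') (f' + 1) st = pvSel L' f' (pvAssign st t) := by
          show (match (t :: L').find? (pvValid st) with
            | none => st
            | some u => pvSel (t :: L') f' (pvAssign st u)) = pvSel L' f' (pvAssign st t)
          rw [List.find?_cons_of_pos hv]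
          exact pvSel_skip f' L' t (pvAssign st t)
            (pvValid_assign_self st t ht)
            (fun u hu => pvRng_assign st t u ht (hL' u hu))
            (pvRng_assign st t t ht ht)
        rw [hsel, List.foldl_cons, hstep]
        apply ih
        · exact fun u hu => pvRng_assign st t u ht (hL' u hu)
        · show (pvAssign st t).2.1.length ≤ (pvAssign st t).2.1.count true + f'
          have e : (pvAssign st t).2.1 = st.2.1.set tw true := by
            show PySem.List.pySetD st.2.1 t.2.1 true = _
            rw [htw, pvSetD_nat _ _ _ htwl]
          rw [e, List.length_set, pvCount_set_true st.2.1 tw htwl hwfalse]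
          omega
    · have hvf : pvValid st t = false := by simpa using hv
      have hstep : pvStepB st t = st := by simp [pvStepB, hvf]
      rw [List.foldl_cons, hstep, pvSel_skip f L' t st hvf hL' ht]
      exact ih st f hL' hf

theorem pvKey_inj (a b : Int × Int × Int) (h : pvKey a = pvKey b) : a = b := by
  obtain ⟨a1, a2, a3⟩ := a
  obtain ⟨b1, b2, b3⟩ := b
  simp only [pvKey, toLex_inj, Prod.mk.injEq] at h
  simp [h.1, h.2.1, h.2.2]

theorem pvPairwise_flatMap {α : Type} {R : α → α → Prop} (S : List Int) (f : Int → List α)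
    (h1 : S.Pairwise (· < ·)) (h2 : ∀ k, (f k).Pairwise R)
    (h3 : ∀ k1 k2, k1 < k2 → ∀ a ∈ f k1, ∀ b ∈ f k2, R a b) :
    (S.flatMap f).Pairwise R := by
  induction S with
  | nil => simp
  | cons k S' ih =>
    simp only [List.flatMap_cons, List.pairwise_append]
    refine ⟨h2 k, ih (List.pairwise_cons.mp h1).2, ?_⟩
    intro a ha b hb
    rcases List.mem_flatMap.mp hb with ⟨k2, hk2, hbf⟩
    exact h3 k k2 ((List.pairwise_cons.mp h1).1 k2 hk2) a ha b hbf

theorem pvL_pairwise (workers bikes : List (List Int)) :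
    (pvL workers bikes).Pairwise
      (fun a c => a.2.1 < c.2.1 ∨ (a.2.1 = c.2.1 ∧ a.2.2 < c.2.2)) := by
  unfold pvL
  apply pvPairwise_flatMap _ _ (PySem.List.pairwise_lt_pyRange_one 0 _)
  · intro i
    rw [List.pairwise_map]
    apply (PySem.List.pairwise_lt_pyRange_one 0 _).imp
    intro j1 j2 hlt
    exact Or.inr ⟨rfl, hlt⟩
  · intro i1 i2 hlt a ha b hb
    rcases List.mem_map.mp ha with ⟨j1, _, rfl⟩
    rcases List.mem_map.mp hb with ⟨j2, _, rfl⟩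
    exact Or.inl hlt

theorem pvL_nodup (workers bikes : List (List Int)) : (pvL workers bikes).Nodup := by
  refine (pvL_pairwise workers bikes).imp ?_
  intro a b h heq
  subst heq
  rcases h with h | ⟨_, h⟩ <;> exact lt_irrefl _ h

theorem pvSorted_pairwise_lt (workers bikes : List (List Int)) :
    (PySem.List.sorted (pvL workers bikes) pvKey).Pairwise
      (fun a b => pvKey a < pvKey b) := by
  have hle := PySem.List.sorted_pairwise (pvL workers bikes) pvKey
  have hnd : (PySem.List.sorted (pvL workers bikes) pvKey).Nodup :=
    (PySem.List.sorted_perm (pvL workers bikes) pvKey false).symm.nodup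
      (pvL_nodup workers bikes)
  refine (hle.and hnd).imp ?_
  intro a b ⟨h1, h2⟩
  exact lt_of_le_of_ne h1 (fun he => h2 (pvKey_inj a b he))

theorem pvBestFold_some (Q : List (Int × Int × Int)) (b : Int × Int × Int) :
    ∃ t, Q.foldl pvBestStep (some b) = some t ∧ t ∈ b :: Q ∧
      ∀ u ∈ b :: Q, pvKey t ≤ pvKey u := by
  induction Q generalizing b with
  | nil =>
    refine ⟨b, rfl, by simp, ?_⟩
    intro u hu
    rw [List.mem_singleton] at hu
    subst hu; exact le_refl _
  | cons q Q' ih =>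
    rw [List.foldl_cons]
    by_cases h : pvKey q < pvKey b
    · have e : pvBestStep (some b) q = some q := by simp [pvBestStep, h]
      obtain ⟨t, heq, hmem, hmin⟩ := ih q
      rw [e]
      refine ⟨t, heq, List.mem_cons_of_mem _ hmem, ?_⟩
      intro u hu
      rcases List.mem_cons.mp hu with rfl | hu'
      · exact le_trans (hmin q (by simp)) (le_of_lt h)
      · exact hmin u hu'
    · have hle : pvKey b ≤ pvKey q := not_lt.mp h
      have e : pvBestStep (some b) q = some b := by simp [pvBestStep, h]
      obtain ⟨t, heq, hmem, hmin⟩ := ih b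
      rw [e]
      refine ⟨t, heq, ?_, ?_⟩
      · rcases List.mem_cons.mp hmem with rfl | hm
        · exact by simp
        · exact List.mem_cons_of_mem _ (List.mem_cons_of_mem _ hm)
      · intro u hu
        rcases List.mem_cons.mp hu with rfl | hu'
        · exact hmin u (by simp)
        · rcases List.mem_cons.mp hu' with rfl | hu''
          · exact le_trans (hmin b (by simp)) hle
          · exact hmin u (List.mem_cons_of_mem _ hu'')

theorem pvScan_eq (workers bikes : List (List Int)) (res : List Int) (wu bu : List Bool) :
    pvScan workers bikes wu bu
      = ((pvL workers bikes).filter (pvValid (res, wu, bu))).foldl pvBestStep none := by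
  rw [← PySem.List.foldl_if_eq_foldl_filter]
  unfold pvScan pvL
  rw [List.foldl_flatMap]
  apply PySem.List.foldl_congr_mem
  intro best i hi
  rw [List.foldl_map]
  by_cases hw : PySem.List.pyGetD wu i false = true
  · rw [if_pos hw]
    symm
    exact (PySem.List.foldl_congr_mem _ _ (fun acc _ => acc) _
      (fun acc j hj => if_neg (by simp [pvValid, hw]))).trans
      (PySem.List.foldl_ignore _ _)
  · have hwf : PySem.List.pyGetD wu i false = false := by simpa using hw
    rw [if_neg (by simp [hwf])]
    apply PySem.List.foldl_congr_mem
    intro acc j hj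
    by_cases hb : PySem.List.pyGetD bu j false = true
    · rw [if_pos hb, if_neg]
      simp [pvValid, hb]
    · have hbf : PySem.List.pyGetD bu j false = false := by simpa using hb
      rw [if_neg (by simp [hbf]), if_pos]
      simp [pvValid, hwf, hbf]

theorem pvScan_find (workers bikes : List (List Int))
    (st : List Int × List Bool × List Bool) :
    (PySem.List.sorted (pvL workers bikes) pvKey).find? (pvValid st)
      = pvScan workers bikes st.2.1 st.2.2 := by
  obtain ⟨res, wu, bu⟩ := st
  rw [pvScan_eq workers bikes res wu bu]
  rw [← List.head?_filter]
  have hperm : ((PySem.List.sorted (pvL workers bikes) pvKey).filter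
      (pvValid (res, wu, bu))).Perm ((pvL workers bikes).filter (pvValid (res, wu, bu))) :=
    List.Perm.filter _ (PySem.List.sorted_perm (pvL workers bikes) pvKey false)
  cases hF : (PySem.List.sorted (pvL workers bikes) pvKey).filter (pvValid (res, wu, bu)) with
  | nil =>
    have hQ : (pvL workers bikes).filter (pvValid (res, wu, bu)) = [] := by
      rw [hF] at hperm
      exact hperm.symm.eq_nil
    rw [hQ]
    rfl
  | cons t rest =>
    rw [hF] at hperm
    cases hQ : (pvL workers bikes).filter (pvValid (res, wu, bu)) with
    | nil => rw [hQ] at hperm; simpa using hperm.eq_nil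
    | cons q Q' =>
      rw [hQ] at hperm
      rw [List.head?_cons]
      have e : (q :: Q').foldl pvBestStep none = Q'.foldl pvBestStep (some q) := by
        simp [pvBestStep]
      rw [e]
      obtain ⟨t', heq, hmem, hmin⟩ := pvBestFold_some Q' q
      rw [heq]
      -- t is the minimum of the filtered sorted list, t' the minimum of the other order
      have hpw : (t :: rest).Pairwise (fun a b => pvKey a < pvKey b) := by
        rw [← hF]
        exact List.Pairwise.filter _ (pvSorted_pairwise_lt workers bikes)
      have htmin : ∀ u ∈ t :: rest, pvKey t ≤ pvKey u := by
        intro u hu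
        rcases List.mem_cons.mp hu with rfl | hu
        · exact le_refl _
        · exact le_of_lt ((List.pairwise_cons.mp hpw).1 u hu)
      have ht'q : t' ∈ t :: rest := hperm.symm.subset hmem
      have htq : t ∈ q :: Q' := hperm.subset (by simp)
      have h1 : pvKey t ≤ pvKey t' := htmin t' ht'q
      have h2 : pvKey t' ≤ pvKey t := hmin t htq
      rw [pvKey_inj t' t (le_antisymm h2 h1)]

theorem pvRounds_eq_sel (workers bikes : List (List Int)) (f : Nat)
    (st : List Int × List Bool × List Bool) :
    pvRounds workers bikes f st = pvSel (PySem.List.sorted (pvL workers bikes) pvKey) f st := by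
  induction f generalizing st with
  | zero => rfl
  | succ f ih =>
    show (match pvScan workers bikes st.2.1 st.2.2 with
      | none => st
      | some t => pvRounds workers bikes f
          (PySem.List.pySetD st.1 t.2.1 t.2.2, PySem.List.pySetD st.2.1 t.2.1 true,
           PySem.List.pySetD st.2.2 t.2.2 true)) = _
    rw [← pvScan_find workers bikes st]
    unfold pvSel
    cases (PySem.List.sorted (pvL workers bikes) pvKey).find? (pvValid st) with
    | none => rfl
    | some t => exact ih (pvAssign st t)

theorem pvPairsA_eq (workers bikes : List (List Int)) :
    (PySem.List.pyRange 0 (workers.length : Int) 1).foldl (fun acc i =>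
      (PySem.List.pyRange 0 (bikes.length : Int) 1).foldl (fun acc2 j =>
        acc2 ++ [(|pvAt workers i 0 - pvAt bikes j 0| + |pvAt workers i 1 - pvAt bikes j 1|, i, j)]) acc) []
    = pvL workers bikes := by
  simp only [PySem.List.foldl_append_singleton_eq_map, PySem.List.foldl_append_eq_flatMap,
    List.nil_append, pvL]

-- t's worker is already used in wused
def pvStepB₀ (wused : List Bool) (t : Int × Int × Int) : Prop :=
  PySem.List.pyGetD wused t.2.1 false = true

-- once every worker is used, the assignment fold is the identity
theorem pvFoldl_skip (l : List (Int × Int × Int)) (st : List Int × List Bool × List Bool)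
    (h : ∀ t ∈ l, pvStepB₀ st.2.1 t) :
    l.foldl pvStepB st = st := by
  induction l with
  | nil => rfl
  | cons t rest ih =>
    have hcond : PySem.List.pyGetD st.2.1 t.2.1 false = true := h t (by simp)
    simp only [List.foldl_cons]
    rw [show pvStepB st t = st by simp [pvStepB, pvValid, hcond]]
    exact ih (fun u hu => h u (by simp [hu]))

theorem pvLoopA_eq (l : List (Int × Int × Int)) (res : List Int) (barr warr : List Bool)
    (count : Int) (hc : count = (warr.count true : Int))
    (hw : ∀ t ∈ l, ∃ k : Nat, t.2.1 = (k : Int) ∧ k < warr.length) :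
    pvLoopA l (warr.length : Int) res barr warr count
      = (l.foldl pvStepB (res, warr, barr)).1 := by
  induction l generalizing res barr warr count with
  | nil => rfl
  | cons t rest ih =>
    obtain ⟨d, w, b⟩ := t
    obtain ⟨k, hk, hklen⟩ := hw (d, w, b) (by simp)
    have hk' : w = (k : Int) := hk
    subst hk'
    by_cases hww : PySem.List.pyGetD warr (k : Int) false = true
    · have hstep : pvStepB (res, warr, barr) (d, (k : Int), b) = (res, warr, barr) := by
        simp [pvStepB, pvValid, hww]
      simp only [pvLoopA, hww, Bool.or_true, List.foldl_cons, hstep]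
      exact ih res barr warr count hc (fun u hu => hw u (by simp [hu]))
    · by_cases hbb : PySem.List.pyGetD barr b false = true
      · have hstep : pvStepB (res, warr, barr) (d, (k : Int), b) = (res, warr, barr) := by
          simp [pvStepB, pvValid, hbb]
        simp only [pvLoopA, hbb, Bool.true_or, List.foldl_cons, hstep]
        exact ih res barr warr count hc (fun u hu => hw u (by simp [hu]))
      · have hwwf : PySem.List.pyGetD warr (k : Int) false = false := by simpa using hww
        have hbbf : PySem.List.pyGetD barr b false = false := by simpa using hbb
        have hkget : warr[k] = false := by
          rw [PySem.List.pyGetD_natCast, List.getD_eq_getElem warr false hklen] at hwwf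
          exact hwwf
        have hset : PySem.List.pySetD warr (k : Int) true = warr.set k true :=
          pvSetD_nat warr k true hklen
        have hstep : pvStepB (res, warr, barr) (d, (k : Int), b)
            = (PySem.List.pySetD res (k : Int) b, warr.set k true,
               PySem.List.pySetD barr b true) := by
          simp [pvStepB, pvValid, pvAssign, hwwf, hbbf, hset]
        have hcount' : (warr.set k true).count true = warr.count true + 1 :=
          pvCount_set_true warr k hklen hkget
        simp only [pvLoopA, hwwf, hbbf, Bool.or_self, List.foldl_cons, hstep, hset]
        rw [if_neg (by simp)]
        by_cases hbr : count + 1 = (warr.length : Int)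
        · rw [if_pos (by simpa using hbr)]
          have hcl : (warr.set k true).count true = (warr.set k true).length := by
            rw [List.length_set, hcount']
            omega
          have hall := List.count_eq_length.mp hcl
          have hsk : ∀ u ∈ rest,
              pvStepB₀ (warr.set k true) u := by
            intro u hu
            obtain ⟨k2, hk2, hklen2⟩ := hw u (by simp [hu])
            show PySem.List.pyGetD (warr.set k true) u.2.1 false = true
            rw [hk2, PySem.List.pyGetD_natCast,
              List.getD_eq_getElem _ false (by simpa using hklen2)]
            exact (hall _ (List.getElem_mem _)).symm
          rw [pvFoldl_skip rest _ hsk]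
        · rw [if_neg (by simpa using hbr)]
          have hc' : count + 1 = ((warr.set k true).count true : Int) := by
            rw [hcount']
            omega
          have hw' : ∀ u ∈ rest, ∃ kk : Nat, u.2.1 = (kk : Int) ∧ kk < (warr.set k true).length := by
            intro u hu
            obtain ⟨k2, h1, h2⟩ := hw u (by simp [hu])
            exact ⟨k2, h1, by simpa using h2⟩
          have := ih (PySem.List.pySetD res (k : Int) b) (PySem.List.pySetD barr b true)
            (warr.set k true) (count + 1) hc' hw'
          rwa [List.length_set] at this

theorem pvA_eq (workers bikes : List (List Int)) :
    assignBikes workers bikes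
      = ((PySem.List.sorted (pvL workers bikes) pvKey).foldl pvStepB
          (List.replicate workers.length (0 : Int), List.replicate workers.length false,
           List.replicate bikes.length false)).1 := by
  simp only [assignBikes]
  rw [pvPairsA_eq]
  have hw : ∀ t ∈ PySem.List.sorted (pvL workers bikes) pvKey,
      ∃ k : Nat, t.2.1 = (k : Int) ∧ k < (List.replicate workers.length false).length := by
    intro t ht
    rw [PySem.List.mem_sorted] at ht
    unfold pvL at ht
    rcases List.mem_flatMap.mp ht with ⟨i, hi, hmem⟩
    rcases List.mem_map.mp hmem with ⟨j, _, rfl⟩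
    have hir := PySem.List.mem_pyRange_one.mp hi
    refine ⟨i.toNat, ?_, ?_⟩
    · simp [Int.toNat_of_nonneg hir.1]
    · rw [List.length_replicate]; omega
  have hlen : (workers.length : Int) = ((List.replicate workers.length false).length : Int) := by
    simp
  rw [hlen, pvLoopA_eq _ _ _ _ 0 (by simp [List.count_replicate]) hw]

theorem pvMain (workers bikes : List (List Int)) :
    assignBikes workers bikes = assignBikes_alt workers bikes := by
  rw [pvA_eq]
  have hrng : ∀ t ∈ PySem.List.sorted (pvL workers bikes) pvKey,
      pvRng (List.replicate workers.length (0 : Int), List.replicate workers.length false,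
        List.replicate bikes.length false) t := by
    intro t ht
    rw [PySem.List.mem_sorted] at ht
    unfold pvL at ht
    rcases List.mem_flatMap.mp ht with ⟨i, hi, hmem⟩
    rcases List.mem_map.mp hmem with ⟨j, hj, rfl⟩
    have hir := PySem.List.mem_pyRange_one.mp hi
    have hjr := PySem.List.mem_pyRange_one.mp hj
    refine ⟨⟨i.toNat, by simp [Int.toNat_of_nonneg hir.1], ?_⟩,
      ⟨j.toNat, by simp [Int.toNat_of_nonneg hjr.1], ?_⟩⟩
    · show i.toNat < (List.replicate workers.length false).length
      rw [List.length_replicate]; omega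
    · show j.toNat < (List.replicate bikes.length false).length
      rw [List.length_replicate]; omega
  rw [pvFold_eq_sel _ _ workers.length hrng
    (by simp [List.count_replicate])]
  rw [← pvRounds_eq_sel]
  rfl

-- ===== VERDICT (by name: the statement is the Claim_ definition above) =====
theorem assignBikes_spec : Claim_equal_assignBikes := by
  intro workers bikes _ _
  unfold Spec_assignBikes
  exact pvMain workers bikes
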